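-- pv_equiv track=rewrite | github.com/Chidarengan/curso-html5-e-css3-guanabara | Exercicios_htm5_css3/calc_rpg/calc_rpg.py | exibir_dados_e_modificador
-- ===== SOURCE A (Python) =====
-- def exibir_dados_e_modificador(statuses):
--     # Cabeçalho atualizado com a nova coluna Mod/2
--     resultado = "Status          | Dado  |   Mod     | Mod/2  | Save  |\n"
--     resultado += "------------------------------------------------------\n"
--
--
--     for nome, valor in statuses.items():
--         # Definindo o dado e o valor máximo conforme o status
--         if valor <= 4:
--             dado = "d4"
--             total_dado = 4
--         elif valor <= 6:
--             dado = "d6"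
--             total_dado = 6
--         elif valor <= 8:
--             dado = "d8"
--             total_dado = 8
--         elif valor <= 10:
--             dado = "d10"
--             total_dado = 10
--         elif valor <= 12:
--             dado = "d12"
--             total_dado = 12
--         elif valor <= 50:
--             dado = "d20"
--             total_dado = 20
--         elif valor <= 100:
--             dado = "d50"
--             total_dado = 50
--         else:
--             dado = "d100"
--             total_dado = 100
--
--         # Calculando modificadores e o Save
--         modificador = valor // 2
--         modificador_destreza = valor // 3 if nome == "Destreza" else None
--         save = (total_dado * 40 // 100) + modificador  # Cálculo do Save
--         mod_div2 = modificador // 2  # Novo valor para Mod/2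
--
--         # Centralizando os valores dentro das colunas, mantendo espaço suficiente para até 4 dígitos
--         if nome == "Destreza":
--             # Para destreza, exibir os dois modificadores separados por "/" e o Mod/2 normal
--             resultado += f"{nome:<15} | {dado:^5} | {modificador:^4}/{modificador_destreza:^4} |  {mod_div2:^5} | {save:^5} |\n"
--         else:
--             # Para os outros status, exibir o modificador normal e Mod/2
--             resultado += f"{nome:<15} | {dado:^5} | {modificador:^9} |  {mod_div2:^5} | {save:^5} |\n"
--
--     return resultado
-- ===== SOURCE B (Python) =====
-- # Binary search over the threshold list instead of an if/elif chain, staged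
-- # compute-then-format passes, manual padding instead of f-string format specs.
--
-- _THRESHOLDS = [4, 6, 8, 10, 12, 50, 100]
-- _NAMES = ["d4", "d6", "d8", "d10", "d12", "d20", "d50", "d100"]
-- _TOTALS = [4, 6, 8, 10, 12, 20, 50, 100]
--
-- _HEADER = ("Status          | Dado  |   Mod     | Mod/2  | Save  |\n"
--            "------------------------------------------------------\n")
--
--
-- def _bisect(v):
--     # index of the first threshold >= v (hand-written bisect_left); 7 if none
--     lo, hi = 0, 7
--     while lo < hi:
--         mid = (lo + hi) // 2
--         if _THRESHOLDS[mid] < v: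
--             lo = mid + 1
--         else:
--             hi = mid
--     return lo
--
--
-- def _center(x, w):
--     s = str(x)
--     pad = w - len(s)
--     if pad <= 0:
--         return s
--     return " " * (pad // 2) + s + " " * (pad - pad // 2)
--
--
-- def _ljust(s, w):
--     return s + " " * (w - len(s)) if len(s) < w else s
--
--
-- def exibir_dados_e_modificador(statuses):
--     # pass 1: numeric records
--     records = []
--     for nome, valor in statuses.items():
--         i = _bisect(valor)
--         mod = valor // 2
--         records.append((nome, i, valor, mod, _TOTALS[i] * 40 // 100 + mod, mod // 2))
--     # pass 2: render
--     out = [_HEADER]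
--     for nome, i, valor, mod, save, half in records:
--         col = (_center(mod, 4) + "/" + _center(valor // 3, 4)
--                if nome == "Destreza" else _center(mod, 9))
--         out.append(_ljust(nome, 15) + " | " + _center(_NAMES[i], 5) + " | " + col +
--                    " |  " + _center(half, 5) + " | " + _center(save, 5) + " |\n")
--     return "".join(out)
-- ===== Notes on version B (the rewrite author's own statement) =====
-- stated objective: alternative
-- what changed: Replaces the if/elif dice chain with a hand-written binary search (bisect_left) over a threshold array indexing parallel name/total arrays, splits the work into a compute-records pass followed by a render pass, and pads columns with explicit string arithmetic instead of f-string format specs.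
import Mathlib
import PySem

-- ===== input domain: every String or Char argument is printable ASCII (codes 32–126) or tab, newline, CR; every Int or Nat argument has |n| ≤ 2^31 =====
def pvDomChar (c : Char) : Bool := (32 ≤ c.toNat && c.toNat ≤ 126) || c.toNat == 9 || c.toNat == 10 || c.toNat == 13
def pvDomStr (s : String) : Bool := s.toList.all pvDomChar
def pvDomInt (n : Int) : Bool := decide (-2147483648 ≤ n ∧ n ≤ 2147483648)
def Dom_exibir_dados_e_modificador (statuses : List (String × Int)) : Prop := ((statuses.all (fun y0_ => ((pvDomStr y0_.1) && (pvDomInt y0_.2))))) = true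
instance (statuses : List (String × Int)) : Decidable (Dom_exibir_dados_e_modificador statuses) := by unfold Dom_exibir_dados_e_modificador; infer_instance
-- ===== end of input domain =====

-- B replaces A's if/elif dice chain by a hand-written binary search over a threshold
-- array with parallel name/total arrays, and renders in a second pass (alternative).

-- Exact ports of Python's format specs '<w' and '^w' with space fill on List Char
-- ('<' pads right; '^' puts pad//2 on the left, the extra space on the right);
-- B's hand-written _center/_ljust compute the very same paddings.
def pvLjust (cs : List Char) (w : Nat) : List Char :=
  cs ++ List.replicate (w - cs.length) ' '
def pvCenter (cs : List Char) (w : Nat) : List Char :=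
  let pad := w - cs.length
  List.replicate (pad / 2) ' ' ++ cs ++ List.replicate (pad - pad / 2) ' '

-- ===== PORT A =====
-- loop body of A: one formatted row (strings handled as List Char throughout)
def pvRowA (nome : String) (valor : Int) : List Char :=
  let dt : String × Int :=
    if valor ≤ 4 then ("d4", 4)
    else if valor ≤ 6 then ("d6", 6)
    else if valor ≤ 8 then ("d8", 8)
    else if valor ≤ 10 then ("d10", 10)
    else if valor ≤ 12 then ("d12", 12)
    else if valor ≤ 50 then ("d20", 20)
    else if valor ≤ 100 then ("d50", 50)
    else ("d100", 100)
  let dado := dt.1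
  let total_dado := dt.2
  let modificador := PySem.Int.floordiv valor 2
  let modificador_destreza : Option Int :=
    if nome = "Destreza" then some (PySem.Int.floordiv valor 3) else none
  let save := PySem.Int.floordiv (total_dado * 40) 100 + modificador
  let mod_div2 := PySem.Int.floordiv modificador 2
  if nome = "Destreza" then
    -- modificador_destreza is `some _` in this branch; getD 0 extracts that value
    pvLjust nome.toList 15 ++ " | ".toList ++ pvCenter dado.toList 5 ++ " | ".toList ++
      pvCenter (PySem.Int.toChars modificador) 4 ++ ['/'] ++
      pvCenter (PySem.Int.toChars (modificador_destreza.getD 0)) 4 ++ " |  ".toList ++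
      pvCenter (PySem.Int.toChars mod_div2) 5 ++ " | ".toList ++
      pvCenter (PySem.Int.toChars save) 5 ++ " |\n".toList
  else
    pvLjust nome.toList 15 ++ " | ".toList ++ pvCenter dado.toList 5 ++ " | ".toList ++
      pvCenter (PySem.Int.toChars modificador) 9 ++ " |  ".toList ++
      pvCenter (PySem.Int.toChars mod_div2) 5 ++ " | ".toList ++
      pvCenter (PySem.Int.toChars save) 5 ++ " |\n".toList

def exibir_dados_e_modificador (statuses : List (String × Int)) : String :=
  let resultado := "Status          | Dado  |   Mod     | Mod/2  | Save  |\n".toList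
  let resultado := resultado ++ "------------------------------------------------------\n".toList
  String.ofList (statuses.foldl (fun res nv => res ++ pvRowA nv.1 nv.2) resultado)

-- ===== PORT B =====
def pvThresholds : List Int := [4, 6, 8, 10, 12, 50, 100]
def pvNames : List String := ["d4", "d6", "d8", "d10", "d12", "d20", "d50", "d100"]
def pvTotals : List Int := [4, 6, 8, 10, 12, 20, 50, 100]

def pvHeader : List Char :=
  "Status          | Dado  |   Mod     | Mod/2  | Save  |\n------------------------------------------------------\n".toList

-- Source B's while-loop binary search, recursion on hi - lo
-- (indices stay in range, so getD transcribes _THRESHOLDS[mid] exactly here)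
def pvBisectLoop (v : Int) (lo hi : Nat) : Nat :=
  if _h : lo < hi then
    let mid := (lo + hi) / 2
    if pvThresholds.getD mid 0 < v then pvBisectLoop v (mid + 1) hi
    else pvBisectLoop v lo mid
  else lo
termination_by hi - lo
decreasing_by all_goals omega

def pvBisect (v : Int) : Nat := pvBisectLoop v 0 7

-- pass 1 record: (nome, i, valor, mod, save, half)
def pvRecord (nome : String) (valor : Int) : String × Nat × Int × Int × Int × Int :=
  let i := pvBisect valor
  let m := PySem.Int.floordiv valor 2
  (nome, i, valor, m, PySem.Int.floordiv (pvTotals.getD i 0 * 40) 100 + m,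
    PySem.Int.floordiv m 2)

-- pass 2: render one record
def pvRender (r : String × Nat × Int × Int × Int × Int) : List Char :=
  let (nome, i, valor, m, save, half) := r
  let col : List Char :=
    if nome = "Destreza" then
      pvCenter (PySem.Int.toChars m) 4 ++ ['/'] ++
        pvCenter (PySem.Int.toChars (PySem.Int.floordiv valor 3)) 4
    else
      pvCenter (PySem.Int.toChars m) 9
  pvLjust nome.toList 15 ++ " | ".toList ++ pvCenter (pvNames.getD i "").toList 5 ++
    " | ".toList ++ col ++ " |  ".toList ++ pvCenter (PySem.Int.toChars half) 5 ++
    " | ".toList ++ pvCenter (PySem.Int.toChars save) 5 ++ " |\n".toList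

def exibir_dados_e_modificador_alt (statuses : List (String × Int)) : String :=
  let records := statuses.map (fun nv => pvRecord nv.1 nv.2)
  String.ofList ((pvHeader :: records.map pvRender).flatten)

-- ===== PRECONDITION & SPEC =====
def Spec_exibir_dados_e_modificador (statuses : List (String × Int)) (out : String) : Prop := out = exibir_dados_e_modificador_alt statuses
instance (statuses : List (String × Int)) (out : String) : Decidable (Spec_exibir_dados_e_modificador statuses out) := by unfold Spec_exibir_dados_e_modificador; infer_instance

-- ===== CLAIM (what is proved, stated in full; the proofs are below) =====
def Claim_equal_exibir_dados_e_modificador : Prop := ∀ (statuses : List (String × Int)), Dom_exibir_dados_e_modificador statuses → Spec_exibir_dados_e_modificador statuses (exibir_dados_e_modificador statuses)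

-- ===== LEMMAS AND PROOFS =====

-- the binary search computes exactly the index of A's if/elif chain
theorem pvBisect_eq (v : Int) : pvBisect v =
    (if v ≤ 4 then 0 else if v ≤ 6 then 1 else if v ≤ 8 then 2
     else if v ≤ 10 then 3 else if v ≤ 12 then 4 else if v ≤ 50 then 5
     else if v ≤ 100 then 6 else 7) := by
  have step : ∀ lo hi : Nat, pvBisectLoop v lo hi =
      if lo < hi then
        (if pvThresholds.getD ((lo + hi) / 2) 0 < v then pvBisectLoop v ((lo + hi) / 2 + 1) hi
         else pvBisectLoop v lo ((lo + hi) / 2))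
      else lo := by
    intro lo hi; rw [pvBisectLoop.eq_def]; split <;> simp_all
  unfold pvBisect
  split_ifs with h1 h2 h3 h4 h5 h6 h7 <;>
  · repeat
      rw [step]
      norm_num [pvThresholds]
      first
        | rw [if_pos (show _ by omega)]
        | rw [if_neg (show _ by omega)]
        | skip

theorem pv_row_eq (n : String) (v : Int) : pvRowA n v = pvRender (pvRecord n v) := by
  unfold pvRowA pvRender pvRecord
  rw [pvBisect_eq]
  by_cases hn : n = "Destreza" <;>
    split_ifs with h1 h2 h3 h4 h5 h6 h7 <;>
      simp [hn, pvNames, pvTotals, List.append_assoc]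

-- ===== VERDICT (by name: the statement is the Claim_ definition above) =====
theorem exibir_dados_e_modificador_spec : Claim_equal_exibir_dados_e_modificador := by
  intro statuses _
  unfold Spec_exibir_dados_e_modificador exibir_dados_e_modificador exibir_dados_e_modificador_alt
  simp only [PySem.List.foldl_append_eq_flatMap]
  simp [List.flatMap_def, List.map_map, pv_row_eq, pvHeader]
  rfl
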